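-- pv_equiv track=rewrite | github.com/diekaltesonne/Contexts | PYTHON/the-minion-game.py | sub_algo
-- ===== SOURCE A (Python) =====
-- def sub_algo(word,stut,substr):
--     stut[substr]=word.count(substr)
--     new_substr = substr+word[word.find(substr)+len(substr)]
--     if  word.find(substr)+len(substr)<(len(word)-1):
--         new_substr = substr+word[word.find(substr)+len(substr)]
--         return sub_algo(word,stut,new_substr)
--     else:
--         return stut
-- ===== SOURCE B (Python) =====
-- # Iterative rewrite: the first-occurrence position of the growing substring never
-- # moves, so every key is substr extended character-by-character along one slice of
-- # word starting right after that occurrence; a single flat loop fills the dict.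
-- # Like the recursive original, mutates the dict `stut` in place (and returns it).
-- def sub_algo(word, stut, substr):
--     start = word.find(substr) + len(substr)
--     s = substr
--     stut[s] = word.count(s)
--     for c in word[start:len(word) - 1]:
--         s += c
--         stut[s] = word.count(s)
--     return stut
-- ===== Notes on version B (the rewrite author's own statement) =====
-- stated objective: simpler
-- what changed: Replaces the recursion by the observation that the first-occurrence position of the growing substring never moves, so every key is substr extended character-by-character along one slice of word starting at find(substr)+len(substr); a single flat loop fills the dict (find called once, no recursion). Pre_ excludes exactly the inputs on which A raises IndexError on its unconditional character access.
import Mathlib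
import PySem

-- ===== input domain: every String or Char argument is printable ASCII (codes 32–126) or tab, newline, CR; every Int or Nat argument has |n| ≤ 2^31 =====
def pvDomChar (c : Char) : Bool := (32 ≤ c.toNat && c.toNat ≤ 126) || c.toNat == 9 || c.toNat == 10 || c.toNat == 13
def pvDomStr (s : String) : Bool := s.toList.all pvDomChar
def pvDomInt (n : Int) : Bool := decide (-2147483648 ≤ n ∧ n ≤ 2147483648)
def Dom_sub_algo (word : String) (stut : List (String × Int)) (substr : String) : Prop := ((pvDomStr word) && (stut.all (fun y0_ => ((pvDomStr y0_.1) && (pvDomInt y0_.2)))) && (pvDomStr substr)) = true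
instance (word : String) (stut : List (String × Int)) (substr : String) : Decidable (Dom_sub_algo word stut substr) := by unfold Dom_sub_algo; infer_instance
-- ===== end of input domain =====

-- B replaces A's recursion by one slice of `word` walked by a flat loop (the
-- first-occurrence position of the growing substring never moves). In Python both
-- A and B mutate the dict `stut` in place; the equivalence proved here is about the
-- returned dict (which is that same mutated dict in both).

-- ===== PORT A =====
-- termination-measure fact for A's recursion, cited by decreasing_by below
theorem subAlgoA_measure (word substr : String) (c : Char)
    (h : PySem.Str.find word substr + PySem.Str.len substr < PySem.Str.len word - 1) :
    word.toList.length - (substr.push c).toList.length < word.toList.length - substr.toList.length := by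
  have h1 := PySem.Chars.neg_one_le_find word.toList substr.toList
  have h2 : PySem.Str.find word substr = PySem.Chars.find word.toList substr.toList := by
    simp [pysem]
  have h3 : PySem.Str.len substr = (substr.toList.length : Int) := by simp [pysem]
  have h4 : PySem.Str.len word = (word.toList.length : Int) := by simp [pysem]
  have h5 : (String.push substr c).toList.length = substr.toList.length + 1 := by
    simp [String.toList_push]
  rw [h2, h3, h4] at h
  omega

def subAlgoA (word : String) (stut : PySem.Dict String Int) (substr : String) : PySem.Dict String Int :=
  let stut1 := stut.insert substr (PySem.Str.count word substr : Int)
  match PySem.Str.pyGet? word (PySem.Str.find word substr + PySem.Str.len substr) with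
  | none => stut1    -- Python raises IndexError on this index access; excluded by Pre_
  | some c =>
    if PySem.Str.find word substr + PySem.Str.len substr < PySem.Str.len word - 1 then
      subAlgoA word stut1 (substr.push c)
    else stut1
termination_by word.toList.length - substr.toList.length
decreasing_by exact subAlgoA_measure word substr c (by assumption)

def sub_algo (word : String) (stut : List (String × Int)) (substr : String) : List (String × Int) :=
  (subAlgoA word (PySem.Dict.mk stut) substr).items

-- ===== PORT B =====
def subAlgoB (word : String) (stut : PySem.Dict String Int) (substr : String) : PySem.Dict String Int :=
  let start := PySem.Str.find word substr + PySem.Str.len substr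
  let tail := PySem.Str.slice word (some start) (some (PySem.Str.len word - 1))
  (tail.toList.foldl
    (fun (acc : PySem.Dict String Int × String) c =>
      let s := acc.2.push c
      (acc.1.insert s (PySem.Str.count word s : Int), s))
    (stut.insert substr (PySem.Str.count word substr : Int), substr)).1

def sub_algo_alt (word : String) (stut : List (String × Int)) (substr : String) : List (String × Int) :=
  (subAlgoB word (PySem.Dict.mk stut) substr).items

-- ===== PRECONDITION & SPEC =====
-- Pre_ excludes exactly the inputs on which A raises IndexError: the very first index
-- access word[word.find(substr)+len(substr)] is out of range (later accesses never are).
def Pre_sub_algo (word : String) (stut : List (String × Int)) (substr : String) : Prop :=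
  PySem.Str.find word substr + PySem.Str.len substr < PySem.Str.len word
instance (word : String) (stut : List (String × Int)) (substr : String) : Decidable (Pre_sub_algo word stut substr) := by unfold Pre_sub_algo; infer_instance

def pvWitness_sub_algo : String × (List (String × Int)) × String := ("banana", [("z", 5)], "an")

def Spec_sub_algo (word : String) (stut : List (String × Int)) (substr : String) (out : List (String × Int)) : Prop := out = sub_algo_alt word stut substr
instance (word : String) (stut : List (String × Int)) (substr : String) (out : List (String × Int)) : Decidable (Spec_sub_algo word stut substr out) := by unfold Spec_sub_algo; infer_instance

-- ===== CLAIM (what is proved, stated in full; the proofs are below) =====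
def Claim_equal_sub_algo : Prop := ∀ (word : String) (stut : List (String × Int)) (substr : String), Dom_sub_algo word stut substr → Pre_sub_algo word stut substr → Spec_sub_algo word stut substr (sub_algo word stut substr)


-- ===== LEMMAS AND PROOFS =====

theorem index_nonneg (word substr : String) :
    0 ≤ PySem.Str.find word substr + PySem.Str.len substr := by
  have h2 : PySem.Str.find word substr = PySem.Chars.find word.toList substr.toList := by simp [pysem]
  have h3 : PySem.Str.len substr = (substr.toList.length : Int) := by simp [pysem]
  rw [h2, h3]
  cases h : substr.toList with
  | nil => simp [PySem.Chars.find_nil]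
  | cons a t =>
    have := PySem.Chars.neg_one_le_find word.toList substr.toList
    rw [h] at this
    simp only [List.length_cons]
    omega

-- slice decomposition helpers
theorem slice_cons_head {α : Type} (cs : List α) (a b : Nat) (hab : a < b) (hb : b ≤ cs.length) :
    PySem.List.slice cs (some (a : Int)) (some (b : Int)) =
      cs[a]'(lt_of_lt_of_le hab hb) :: PySem.List.slice cs (some ((a + 1 : Nat) : Int)) (some (b : Int)) := by
  rw [PySem.List.slice_natCast, PySem.List.slice_natCast,
      show b - a = (b - (a + 1)) + 1 by omega,
      List.drop_eq_getElem_cons (show a < cs.length by omega), List.take_succ_cons]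

theorem slice_empty {α : Type} (cs : List α) (a b : Nat) (hab : b ≤ a) :
    PySem.List.slice cs (some (a : Int)) (some (b : Int)) = [] := by
  rw [PySem.List.slice_natCast]
  simp [Nat.sub_eq_zero_of_le hab]

theorem toList_tail (word : String) (a b : Option Int) :
    (PySem.Str.slice word a b).toList = PySem.List.slice word.toList a b := by
  simp [pysem]

theorem B_base (word : String) (d : PySem.Dict String Int) (substr : String)
    (hpre : PySem.Str.find word substr + PySem.Str.len substr < PySem.Str.len word)
    (hif : ¬ (PySem.Str.find word substr + PySem.Str.len substr < PySem.Str.len word - 1)) :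
    subAlgoB word d substr = d.insert substr (PySem.Str.count word substr : Int) := by
  have h2 : PySem.Str.find word substr = PySem.Chars.find word.toList substr.toList := by simp [pysem]
  have h3 : PySem.Str.len substr = (substr.toList.length : Int) := by simp [pysem]
  have h4 : PySem.Str.len word = (word.toList.length : Int) := by simp [pysem]
  have hnn := index_nonneg word substr
  rw [h2, h3] at hnn
  rw [h2, h3, h4] at hif hpre
  simp only [subAlgoB]
  rw [toList_tail, h2, h3, h4]
  rw [show PySem.Chars.find word.toList substr.toList + (substr.toList.length : Int)
        = (((PySem.Chars.find word.toList substr.toList + substr.toList.length).toNat : Nat) : Int) from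
      (Int.toNat_of_nonneg hnn).symm,
     show ((word.toList.length : Int) - 1) = (((word.toList.length - 1 : Nat)) : Int) by
      have := PySem.Chars.neg_one_le_find word.toList substr.toList
      omega]
  rw [slice_empty _ _ _ (by omega)]
  rfl

theorem find_eq_of_first (cs sub : List Char) (k : Nat)
    (h1 : sub <+: cs.drop k) (h2 : ∀ i < k, ¬ sub <+: cs.drop i) :
    PySem.Chars.find cs sub = (k : Int) := by
  have hinf : sub <:+: cs := h1.isInfix.trans (cs.drop_suffix k).isInfix
  have hnn : 0 ≤ PySem.Chars.find cs sub := (PySem.Chars.find_nonneg_iff cs sub).mpr hinf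
  obtain ⟨hocc, hmin⟩ := PySem.Chars.find_spec hnn
  rcases lt_trichotomy (PySem.Chars.find cs sub).toNat k with h | h | h
  · exact absurd hocc (h2 _ h)
  · omega
  · exact absurd h1 (hmin k h)

theorem find_push_found (cs s : List Char) (c : Char)
    (hp : 0 ≤ PySem.Chars.find cs s)
    (hc : cs[(PySem.Chars.find cs s).toNat + s.length]? = some c) :
    PySem.Chars.find cs (s ++ [c]) = PySem.Chars.find cs s := by
  set p := (PySem.Chars.find cs s).toNat with hpdef
  obtain ⟨hocc, hmin⟩ := PySem.Chars.find_spec hp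
  obtain ⟨r, hr⟩ := hocc
  have hr0 : r[0]? = some c := by
    have : (cs.drop p)[s.length]? = some c := by
      rw [List.getElem?_drop]; exact hc
    rw [show List.drop p cs = s ++ r from by rw [hpdef]; exact hr.symm] at this
    simpa [List.getElem?_append_right (Nat.le_refl s.length)] using this
  obtain ⟨r', hr'⟩ : ∃ r', r = c :: r' := by
    cases r with
    | nil => simp at hr0
    | cons a t => simp_all
  have h1 : (s ++ [c]) <+: cs.drop p := by
    rw [← hr, hr']
    exact ⟨r', by simp⟩
  have h2 : ∀ i < p, ¬ (s ++ [c]) <+: cs.drop i := by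
    intro i hi hcon
    exact hmin i hi (((s.prefix_append [c])).trans hcon)
  rw [find_eq_of_first cs (s ++ [c]) p h1 h2]
  omega

theorem find_push_notfound (cs s : List Char) (c : Char)
    (hp : PySem.Chars.find cs s = -1) :
    PySem.Chars.find cs (s ++ [c]) = -1 := by
  rw [PySem.Chars.find_eq_neg_one_iff] at hp ⊢
  intro hcon
  exact hp ((s.prefix_append [c]).isInfix.trans hcon)

theorem B_step (word : String) (d : PySem.Dict String Int) (substr : String) (c : Char)
    (hif : PySem.Str.find word substr + PySem.Str.len substr < PySem.Str.len word - 1)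
    (hc : PySem.Str.pyGet? word (PySem.Str.find word substr + PySem.Str.len substr) = some c) :
    subAlgoB word d substr =
      subAlgoB word (d.insert substr (PySem.Str.count word substr : Int)) (substr.push c) := by
  have h2 : PySem.Str.find word substr = PySem.Chars.find word.toList substr.toList := by simp [pysem]
  have h3 : PySem.Str.len substr = (substr.toList.length : Int) := by simp [pysem]
  have h4 : PySem.Str.len word = (word.toList.length : Int) := by simp [pysem]
  have h2' : PySem.Str.find word (substr.push c) = PySem.Chars.find word.toList (substr.toList ++ [c]) := by
    simp [pysem, String.toList_push]
  have h3' : PySem.Str.len (substr.push c) = ((substr.toList.length : Int) + 1) := by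
    simp [pysem, String.toList_push]
  have hnn := index_nonneg word substr
  have hm1 := PySem.Chars.neg_one_le_find word.toList substr.toList
  rw [h2, h3, h4] at hif
  rw [h2, h3] at hnn
  have ha : (PySem.Chars.find word.toList substr.toList + (substr.toList.length : Int))
      = (((PySem.Chars.find word.toList substr.toList + substr.toList.length).toNat : Nat) : Int) :=
    (Int.toNat_of_nonneg hnn).symm
  have haW : (PySem.Chars.find word.toList substr.toList + substr.toList.length).toNat < word.toList.length := by omega
  have hcget : word.toList[(PySem.Chars.find word.toList substr.toList + substr.toList.length).toNat]? = some c := by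
    rw [h2, h3, ha, PySem.Str.pyGet?_natCast] at hc
    exact hc
  have hceq : word.toList[(PySem.Chars.find word.toList substr.toList + substr.toList.length).toNat]'haW = c := by
    have := List.getElem?_eq_getElem (l := word.toList) haW
    rw [hcget] at this
    exact (Option.some.inj this).symm
  -- the first-occurrence position does not move when substr is extended by c
  have hF1 : PySem.Chars.find word.toList (substr.toList ++ [c]) = PySem.Chars.find word.toList substr.toList := by
    by_cases h0 : 0 ≤ PySem.Chars.find word.toList substr.toList
    · apply find_push_found _ _ _ h0
      rw [show (PySem.Chars.find word.toList substr.toList).toNat + substr.toList.length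
            = (PySem.Chars.find word.toList substr.toList + substr.toList.length).toNat by omega]
      exact hcget
    · have : PySem.Chars.find word.toList substr.toList = -1 := by omega
      rw [this]
      exact find_push_notfound _ _ _ this
  simp only [subAlgoB]
  rw [toList_tail, toList_tail]
  rw [h2, h3, h4, h2', h3', hF1]
  rw [ha,
      show (PySem.Chars.find word.toList substr.toList + ((substr.toList.length : Int) + 1))
        = ((((PySem.Chars.find word.toList substr.toList + substr.toList.length).toNat + 1 : Nat)) : Int) by omega,
      show ((word.toList.length : Int) - 1) = (((word.toList.length - 1 : Nat)) : Int) by omega]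
  rw [slice_cons_head word.toList _ _ (by omega) (by omega)]
  rw [hceq, List.foldl_cons]

theorem subAlgoA_eq_subAlgoB_aux (word : String) : ∀ (n : Nat) (d : PySem.Dict String Int) (substr : String),
    word.toList.length - substr.toList.length ≤ n →
    PySem.Str.find word substr + PySem.Str.len substr < PySem.Str.len word →
    subAlgoA word d substr = subAlgoB word d substr := by
  intro n
  induction n with
  | zero =>
    intro d substr hm hpre
    have h2 : PySem.Str.find word substr = PySem.Chars.find word.toList substr.toList := by simp [pysem]
    have h3 : PySem.Str.len substr = (substr.toList.length : Int) := by simp [pysem]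
    have h4 : PySem.Str.len word = (word.toList.length : Int) := by simp [pysem]
    have hnn := index_nonneg word substr
    have hm1 := PySem.Chars.neg_one_le_find word.toList substr.toList
    have hnn' := hnn; rw [h2, h3] at hnn'
    have hpre' := hpre; rw [h2, h3, h4] at hpre'
    have ha : (PySem.Chars.find word.toList substr.toList + (substr.toList.length : Int))
        = (((PySem.Chars.find word.toList substr.toList + substr.toList.length).toNat : Nat) : Int) :=
      (Int.toNat_of_nonneg hnn').symm
    have haW : (PySem.Chars.find word.toList substr.toList + substr.toList.length).toNat < word.toList.length := by omega
    obtain ⟨c, hcel⟩ : ∃ c, word.toList[(PySem.Chars.find word.toList substr.toList + substr.toList.length).toNat]? = some c :=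
      ⟨_, List.getElem?_eq_getElem haW⟩
    have hget : PySem.Str.pyGet? word (PySem.Str.find word substr + PySem.Str.len substr) = some c := by
      rw [h2, h3, ha, PySem.Str.pyGet?_natCast]
      exact hcel
    have hif : ¬ (PySem.Str.find word substr + PySem.Str.len substr < PySem.Str.len word - 1) := by
      rw [h2, h3, h4]
      omega
    rw [subAlgoA.eq_def, hget]
    simp only [if_neg hif]
    exact (B_base word d substr hpre hif).symm
  | succ n ih =>
    intro d substr hm hpre
    have h2 : PySem.Str.find word substr = PySem.Chars.find word.toList substr.toList := by simp [pysem]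
    have h3 : PySem.Str.len substr = (substr.toList.length : Int) := by simp [pysem]
    have h4 : PySem.Str.len word = (word.toList.length : Int) := by simp [pysem]
    have hnn := index_nonneg word substr
    have hm1 := PySem.Chars.neg_one_le_find word.toList substr.toList
    have hnn' := hnn; rw [h2, h3] at hnn'
    have hpre' := hpre; rw [h2, h3, h4] at hpre'
    have ha : (PySem.Chars.find word.toList substr.toList + (substr.toList.length : Int))
        = (((PySem.Chars.find word.toList substr.toList + substr.toList.length).toNat : Nat) : Int) :=
      (Int.toNat_of_nonneg hnn').symm
    have haW : (PySem.Chars.find word.toList substr.toList + substr.toList.length).toNat < word.toList.length := by omega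
    obtain ⟨c, hcel⟩ : ∃ c, word.toList[(PySem.Chars.find word.toList substr.toList + substr.toList.length).toNat]? = some c :=
      ⟨_, List.getElem?_eq_getElem haW⟩
    have hget : PySem.Str.pyGet? word (PySem.Str.find word substr + PySem.Str.len substr) = some c := by
      rw [h2, h3, ha, PySem.Str.pyGet?_natCast]
      exact hcel
    rw [subAlgoA.eq_def, hget]
    by_cases hif : PySem.Str.find word substr + PySem.Str.len substr < PySem.Str.len word - 1
    · simp only [if_pos hif]
      rw [B_step word d substr c hif hget]
      apply ih
      · have h5 : (substr.push c).toList.length = substr.toList.length + 1 := by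
          simp [String.toList_push]
        have hif' := hif; rw [h2, h3, h4] at hif'
        omega
      · -- Pre_ holds for the extended substring
        have h2c : PySem.Str.find word (substr.push c) = PySem.Chars.find word.toList (substr.toList ++ [c]) := by
          simp [pysem, String.toList_push]
        have h3c : PySem.Str.len (substr.push c) = ((substr.toList.length : Int) + 1) := by
          simp [pysem, String.toList_push]
        have hif' := hif; rw [h2, h3, h4] at hif'
        rw [h2c, h3c, h4]
        by_cases h0 : 0 ≤ PySem.Chars.find word.toList substr.toList
        · rw [find_push_found _ _ _ h0 (by
            rw [show (PySem.Chars.find word.toList substr.toList).toNat + substr.toList.length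
                  = (PySem.Chars.find word.toList substr.toList + substr.toList.length).toNat by omega]
            exact hcel)]
          omega
        · rw [find_push_notfound _ _ _ (by omega)]
          omega
    · simp only [if_neg hif]
      exact (B_base word d substr hpre hif).symm

theorem subAlgoA_eq_subAlgoB (word : String) (d : PySem.Dict String Int) (substr : String)
    (hpre : PySem.Str.find word substr + PySem.Str.len substr < PySem.Str.len word) :
    subAlgoA word d substr = subAlgoB word d substr :=
  subAlgoA_eq_subAlgoB_aux word word.toList.length d substr (by omega) hpre

-- ===== VERDICT (by name: the statement is the Claim_ definition above) =====
theorem sub_algo_spec : Claim_equal_sub_algo := by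
  intro word stut substr _ hpre
  unfold Spec_sub_algo sub_algo sub_algo_alt
  exact congrArg PySem.Dict.items (subAlgoA_eq_subAlgoB word (PySem.Dict.mk stut) substr hpre)
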